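-- pv_equiv track=rewrite | github.com/jameswol-ai/arc | streamlit_app.py | floorplan
-- ===== SOURCE A (Python) =====
-- def floorplan(span, depth):
--     grid = []
--     for y in range(depth):
--         row = ""
--         for x in range(span):
--             if x in [0, span-1] or y in [0, depth-1]:
--                 row += "█"
--             elif x % 4 == 0 and y % 4 == 0:
--                 row += "●"
--             elif x % 4 == 0 or y % 4 == 0:
--                 row += "╬"
--             else:
--                 row += " "
--         grid.append(row)
--     return "\n".join(grid)
-- ===== SOURCE B (Python) =====
-- def floorplan(span, depth):
--     # Layered overwriting: start from a blank grid, paint grid lines, then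
--     # intersections, then the outer frame; each layer overwrites the previous.
--     grid = [[" "] * span for _ in range(depth)]
--     grid = [["\u256c" if x % 4 == 0 or y % 4 == 0 else c
--              for x, c in enumerate(row)] for y, row in enumerate(grid)]
--     grid = [["\u25cf" if x % 4 == 0 and y % 4 == 0 else c
--              for x, c in enumerate(row)] for y, row in enumerate(grid)]
--     grid = [["\u2588" if x == 0 or x == span - 1 or y == 0 or y == depth - 1 else c
--              for x, c in enumerate(row)] for y, row in enumerate(grid)]
--     return "\n".join("".join(row) for row in grid)
-- ===== Notes on version B (the rewrite author's own statement) =====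
-- stated objective: alternative
-- what changed: Replaces A's single per-cell if/elif priority chain (building each row by string concatenation) with layered overwriting passes over a 2D char grid: blank grid, then grid-line cells, then intersections, then the outer frame, joined at the end.
import Mathlib
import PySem

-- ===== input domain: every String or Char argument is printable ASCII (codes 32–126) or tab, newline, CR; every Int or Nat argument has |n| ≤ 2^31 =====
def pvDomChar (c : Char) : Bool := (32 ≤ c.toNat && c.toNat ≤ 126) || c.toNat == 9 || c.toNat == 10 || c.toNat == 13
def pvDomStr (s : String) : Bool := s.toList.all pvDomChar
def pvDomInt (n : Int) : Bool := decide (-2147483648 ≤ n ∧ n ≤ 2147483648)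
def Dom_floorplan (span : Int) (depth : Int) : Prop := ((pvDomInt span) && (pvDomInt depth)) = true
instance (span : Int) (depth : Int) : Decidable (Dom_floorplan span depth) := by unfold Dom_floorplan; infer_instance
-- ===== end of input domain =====

-- B replaces A's single per-cell priority chain by layered overwriting passes
-- (blank grid, then grid lines, then intersections, then the frame); objective: alternative decomposition, not faster.

-- ===== PORT A =====
def floorplan (span : Int) (depth : Int) : String :=
  let grid : List (List Char) :=
    (PySem.List.pyRange 0 depth).foldl (fun grid y =>
      let row : List Char :=
        (PySem.List.pyRange 0 span).foldl (fun row x =>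
          if x ∈ ([0, span - 1] : List Int) ∨ y ∈ ([0, depth - 1] : List Int) then row ++ ['█']
          else if PySem.Int.mod x 4 = 0 ∧ PySem.Int.mod y 4 = 0 then row ++ ['●']
          else if PySem.Int.mod x 4 = 0 ∨ PySem.Int.mod y 4 = 0 then row ++ ['╬']
          else row ++ [' ']) []
      grid ++ [row]) []
  String.ofList (PySem.Chars.join ['\n'] grid)

-- ===== PORT B =====
def floorplan_alt (span : Int) (depth : Int) : String :=
  let grid0 : List (List Char) :=
    (PySem.List.pyRange 0 depth).map (fun _ => List.replicate span.toNat ' ')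
  let grid1 : List (List Char) :=
    (PySem.List.enumerate grid0).map (fun yr => (PySem.List.enumerate yr.2).map (fun xc =>
      if PySem.Int.mod xc.1 4 = 0 ∨ PySem.Int.mod yr.1 4 = 0 then '╬' else xc.2))
  let grid2 : List (List Char) :=
    (PySem.List.enumerate grid1).map (fun yr => (PySem.List.enumerate yr.2).map (fun xc =>
      if PySem.Int.mod xc.1 4 = 0 ∧ PySem.Int.mod yr.1 4 = 0 then '●' else xc.2))
  let grid3 : List (List Char) :=
    (PySem.List.enumerate grid2).map (fun yr => (PySem.List.enumerate yr.2).map (fun xc =>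
      if xc.1 = 0 ∨ xc.1 = span - 1 ∨ yr.1 = 0 ∨ yr.1 = depth - 1 then '█' else xc.2))
  String.ofList (PySem.Chars.join ['\n'] grid3)

-- ===== PRECONDITION & SPEC =====
def Spec_floorplan (span : Int) (depth : Int) (out : String) : Prop := out = floorplan_alt span depth
instance (span : Int) (depth : Int) (out : String) : Decidable (Spec_floorplan span depth out) := by unfold Spec_floorplan; infer_instance

-- ===== CLAIM (what is proved, stated in full; the proofs are below) =====
def Claim_equal_floorplan : Prop := ∀ (span : Int) (depth : Int), Dom_floorplan span depth → Spec_floorplan span depth (floorplan span depth)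

-- ===== LEMMAS AND PROOFS =====

/-- The character A ends up writing at (y, x), as one nested conditional. -/
def pvCell (span depth y x : Int) : Char :=
  if x = 0 ∨ x = span - 1 ∨ y = 0 ∨ y = depth - 1 then '█'
  else if PySem.Int.mod x 4 = 0 ∧ PySem.Int.mod y 4 = 0 then '●'
  else if PySem.Int.mod x 4 = 0 ∨ PySem.Int.mod y 4 = 0 then '╬'
  else ' '

theorem pvPyRange0_eq (n : Int) :
    PySem.List.pyRange 0 n = (List.range n.toNat).map (fun k : Nat => (k : Int)) := by
  rcases le_or_gt 0 n with h | h
  · conv_lhs => rw [← Int.toNat_of_nonneg h]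
    exact PySem.List.pyRange_zero_natCast n.toNat
  · have h1 : PySem.List.pyRange 0 n = [] := by
      apply List.eq_nil_iff_forall_not_mem.mpr
      intro x hx
      have := PySem.List.mem_pyRange_one.mp hx
      omega
    have h2 : n.toNat = 0 := by omega
    simp [h1, h2]

theorem pvMapEnumMap {α β : Type} (g : Int × α → β) (f : Nat → α) (n : Nat) :
    (PySem.List.enumerate ((List.range n).map f)).map g
      = (List.range n).map (fun i : Nat => g ((i : Int), f i)) := by
  apply List.ext_getElem
  · simp [PySem.List.length_enumerate]
  · intro k h1 h2
    simp [PySem.List.getElem_enumerate]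

-- ===== VERDICT (by name: the statement is the Claim_ definition above) =====
theorem floorplan_spec : Claim_equal_floorplan := by
  intro span depth _
  unfold Spec_floorplan floorplan floorplan_alt
  have hrow : ∀ y : Int,
      (fun (row : List Char) (x : Int) =>
        if x ∈ ([0, span - 1] : List Int) ∨ y ∈ ([0, depth - 1] : List Int) then row ++ ['█']
        else if PySem.Int.mod x 4 = 0 ∧ PySem.Int.mod y 4 = 0 then row ++ ['●']
        else if PySem.Int.mod x 4 = 0 ∨ PySem.Int.mod y 4 = 0 then row ++ ['╬']
        else row ++ [' '])
      = fun row x => row ++ [pvCell span depth y x] := by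
    intro y; funext row x
    simp only [pvCell, List.mem_cons, List.not_mem_nil, or_false]
    split_ifs <;> first | rfl | (exfalso; tauto)
  have hrep : List.replicate span.toNat ' ' = (List.range span.toNat).map (fun _ => ' ') := by
    simp [List.map_const']
  simp only [hrow, PySem.List.foldl_append_singleton_eq_map, List.nil_append,
    pvPyRange0_eq, List.map_map, Function.comp_def, hrep]
  simp only [pvMapEnumMap]
  simp only [pvCell]
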